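-- pv_equiv track=rewrite | github.com/SolnechnayaS/111 | HomeWork4/function_file.py | negafibonacci
-- ===== SOURCE A (Python) =====
-- def negafibonacci (len_list):
--     fib_list = [1,0,1]
--     for i in range (3, len_list+2):
--         a = fib_list[i-2]+fib_list[i-1]
--         fib_list.append (a)
--     for i in range (0, len_list-1):
--         b = fib_list[1]-fib_list[0]
--         fib_list.insert (0, b)
--     return fib_list
-- ===== SOURCE B (Python) =====
-- def negafibonacci(len_list):
--     # One Fibonacci table plus an index/sign mapping instead of A's two
--     # mutating recurrence loops with front insertion.
--     m = max(1, len_list)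
--     fib = [0, 1]
--     for _ in range(m - 1):
--         fib.append(fib[-1] + fib[-2])
--     def nf(k):
--         if k >= 0:
--             return fib[k]
--         return fib[-k] if (-k) % 2 == 1 else -fib[-k]
--     return [nf(k) for k in range(-m, m + 1)]
-- ===== Notes on version B (the rewrite author's own statement) =====
-- stated objective: alternative
-- what changed: A grows a seed list [1,0,1] with a forward recurrence loop and then repeatedly front-inserts fib[1]-fib[0]; B instead builds one table of nonnegative Fibonacci numbers and emits the result in a single pass over the symmetric index range -m..m (m = max(1, len_list)) via an index/sign mapping for the negafibonacci part.
import Mathlib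
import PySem

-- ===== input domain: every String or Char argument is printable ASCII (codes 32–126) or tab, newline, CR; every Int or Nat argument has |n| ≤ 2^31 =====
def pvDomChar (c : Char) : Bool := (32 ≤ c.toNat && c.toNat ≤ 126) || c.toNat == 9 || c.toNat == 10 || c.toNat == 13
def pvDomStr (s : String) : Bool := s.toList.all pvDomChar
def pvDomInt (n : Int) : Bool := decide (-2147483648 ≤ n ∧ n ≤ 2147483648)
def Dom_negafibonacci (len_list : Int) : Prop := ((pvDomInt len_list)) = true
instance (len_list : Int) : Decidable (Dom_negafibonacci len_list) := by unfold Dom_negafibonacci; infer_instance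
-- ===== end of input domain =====

-- B replaces A's two mutating recurrence loops (append loop plus repeated front
-- insertion) by one nonnegative-Fibonacci table and an index/sign mapping over
-- the symmetric index range -m..m (m = max(1, len_list)); same return value.

-- ===== PORT A =====
-- Literal port of A. Both loop bodies index positions that are always in range
-- (the list starts with 3 elements and only grows), so the `0` default of
-- pyGetD is never used and the Python never raises: A is total.
def negafibonacci (len_list : Int) : List Int :=
  let fib_list := (PySem.List.pyRange 3 (len_list + 2) 1).foldl
    (fun fl i => fl ++ [PySem.List.pyGetD fl (i - 2) 0 + PySem.List.pyGetD fl (i - 1) 0])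
    [1, 0, 1]
  (PySem.List.pyRange 0 (len_list - 1) 1).foldl
    (fun fl _ => (PySem.List.pyGetD fl 1 0 - PySem.List.pyGetD fl 0 0) :: fl)
    fib_list

-- ===== PORT B =====
-- Literal port of Source B: fib table built by appending fib[-1] + fib[-2], then
-- the comprehension over range(-m, m+1) mapping each k through a table lookup
-- (all lookups are in range: 0 ≤ |k| ≤ m < len(fib), so the default is unused).
def negafibonacci_alt (len_list : Int) : List Int :=
  let m : Int := max 1 len_list
  let fib := (PySem.List.pyRange 0 (m - 1) 1).foldl
    (fun fl _ => fl ++ [PySem.List.pyGetD fl (-1) 0 + PySem.List.pyGetD fl (-2) 0])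
    [0, 1]
  (PySem.List.pyRange (-m) (m + 1) 1).map (fun k =>
    if 0 ≤ k then PySem.List.pyGetD fib k 0
    else if PySem.Int.mod (-k) 2 = 1 then PySem.List.pyGetD fib (-k) 0
    else -(PySem.List.pyGetD fib (-k) 0))

-- ===== PRECONDITION & SPEC =====
def Spec_negafibonacci (len_list : Int) (out : List Int) : Prop := out = negafibonacci_alt len_list
instance (len_list : Int) (out : List Int) : Decidable (Spec_negafibonacci len_list out) := by unfold Spec_negafibonacci; infer_instance

-- ===== CLAIM (what is proved, stated in full; the proofs are below) =====
def Claim_equal_negafibonacci : Prop := ∀ (len_list : Int), Dom_negafibonacci len_list → Spec_negafibonacci len_list (negafibonacci len_list)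

-- ===== LEMMAS AND PROOFS =====

-- The negafibonacci value at an arbitrary integer index (proof-side reference).
def nf (k : Int) : Int :=
  if 0 ≤ k then (Nat.fib k.toNat : Int)
  else if (-k) % 2 = 1 then (Nat.fib (-k).toNat : Int)
  else -(Nat.fib (-k).toNat : Int)

lemma nf_rec_nonneg (t : Nat) : nf ((t : Int) + 2) = nf t + nf ((t : Int) + 1) := by
  simp only [nf, if_pos (by omega : (0:Int) ≤ (t:Int) + 2), if_pos (by omega : (0:Int) ≤ (t:Int)),
    if_pos (by omega : (0:Int) ≤ (t:Int) + 1)]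
  rw [show ((t : Int) + 2).toNat = t + 2 from by omega, show ((t : Int) + 1).toNat = t + 1 from by omega,
    Int.toNat_natCast, Nat.fib_add_two]
  push_cast; ring

lemma nf_neg (t : Nat) : nf (-((t : Int) + 1)) =
    if (t + 1) % 2 = 1 then (Nat.fib (t + 1) : Int) else -(Nat.fib (t + 1) : Int) := by
  have h0 : ¬ (0 ≤ -((t:Int)+1)) := by omega
  have h1 : (-(-((t:Int)+1))).toNat = t + 1 := by omega
  have h2 : (-(-((t:Int)+1))) % 2 = (((t+1) % 2 : Nat) : Int) := by push_cast; omega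
  simp only [nf, if_neg h0, h1, h2]
  rcases Nat.even_or_odd t with h | h <;> rcases h with ⟨c, hc⟩ <;>
    simp [hc, Nat.add_mod]
  omega

lemma nf_rec_neg (a : Int) (ha : a ≤ -1) : nf (a - 1) = nf (a + 1) - nf a := by
  obtain ⟨s, hs⟩ : ∃ s : Nat, a = -((s : Int) + 1) := ⟨(-a - 1).toNat, by omega⟩
  subst hs
  match s with
  | 0 => decide
  | (r + 1) =>
    have e1 : (-((((r:Nat) + 1 : Nat) : Int) + 1) - 1) = -(((r + 2 : Nat) : Int) + 1) := by push_cast; ring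
    have e2 : (-((((r:Nat) + 1 : Nat) : Int) + 1) + 1) = -(((r : Nat) : Int) + 1) := by push_cast; ring
    rw [e1, e2, nf_neg, nf_neg, nf_neg]
    simp only [show r+2+1 = r+3 from by omega, show r+1+1 = r+2 from by omega]
    have hfi : (Nat.fib (r + 3) : Int) = (Nat.fib (r + 1) : Int) + (Nat.fib (r + 2) : Int) := by
      exact_mod_cast (Nat.fib_add_two (n := r + 1))
    rcases Nat.even_or_odd r with ⟨c, hc⟩ | ⟨c, hc⟩
    · rw [if_pos (by omega : (r+3)%2 = 1), if_pos (by omega : (r+1)%2 = 1),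
        if_neg (by omega : ¬ (r+2)%2 = 1)]
      omega
    · rw [if_neg (by omega : ¬ (r+3)%2 = 1), if_neg (by omega : ¬ (r+1)%2 = 1),
        if_pos (by omega : (r+2)%2 = 1)]
      omega

-- negative-index lookups used by B's table builder
lemma pyGetD_concat_neg_one {α : Type} (xs : List α) (a d : α) :
    PySem.List.pyGetD (xs ++ [a]) (-1) d = a := by
  have h : (xs ++ [a]).length = xs.length + 1 := by simp
  simp only [PySem.List.pyGetD, PySem.List.pyGet?, PySem.List.pyIdx?, h]
  rw [if_neg (by omega), if_pos (by omega)]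
  simp

lemma pyGetD_concat2_neg_two {α : Type} (xs : List α) (a b d : α) :
    PySem.List.pyGetD (xs ++ [a, b]) (-2) d = a := by
  have h : (xs ++ [a, b]).length = xs.length + 2 := by simp
  simp only [PySem.List.pyGetD, PySem.List.pyGet?, PySem.List.pyIdx?, h]
  rw [if_neg (by omega), if_pos (by omega)]
  rw [show xs.length + 2 - (-(-2:Int)).toNat = xs.length from by omega,
    show xs ++ [a, b] = (xs ++ [a]) ++ [b] from by simp]
  simp only [Option.bind_some]
  rw [List.getElem?_append_left (by simp)]
  simp

-- A's first loop builds the list [nf(-1), nf 0, …, nf(n+1)]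
lemma a_first_loop (n : Nat) :
    (PySem.List.pyRange 3 (3 + (n : Int)) 1).foldl
      (fun fl i => fl ++ [PySem.List.pyGetD fl (i - 2) 0 + PySem.List.pyGetD fl (i - 1) 0])
      [1, 0, 1]
    = (PySem.List.pyRange (-1) (2 + (n : Int)) 1).map nf := by
  induction n with
  | zero => decide
  | succ n ih =>
    have e1 : (3 + ((n+1 : Nat) : Int)) = (3 + (n : Int)) + 1 := by push_cast; ring
    have e2 : (2 + ((n+1 : Nat) : Int)) = (2 + (n : Int)) + 1 := by push_cast; ring
    rw [e1, e2, PySem.List.pyRange_one_succ_right (by omega),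
        PySem.List.pyRange_one_succ_right (by omega), List.foldl_append, ih]
    simp only [List.foldl_cons, List.foldl_nil, List.map_append, List.map_cons, List.map_nil]
    congr 1
    have i1 : (3 + (n:Int)) - 2 = ((n + 1 : Nat) : Int) := by push_cast; ring
    have i2 : (3 + (n:Int)) - 1 = ((n + 2 : Nat) : Int) := by push_cast; ring
    rw [i1, i2, PySem.List.pyGetD_map_pyRange_one nf (-1) (2 + (n:Int)) (n+1) 0 (by omega),
        PySem.List.pyGetD_map_pyRange_one nf (-1) (2 + (n:Int)) (n+2) 0 (by omega)]
    have j1 : (-1 : Int) + ((n + 1 : Nat) : Int) = (n : Int) := by push_cast; ring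
    have j2 : (-1 : Int) + ((n + 2 : Nat) : Int) = (n : Int) + 1 := by push_cast; ring
    have j3 : (2 : Int) + (n : Int) = (n : Int) + 2 := by ring
    rw [j1, j2, j3, ← nf_rec_nonneg]

-- A's second loop prepends nf of ever smaller indices
lemma a_second_loop (k : Nat) (a b : Int) (ha : a ≤ -1) (hb : a + 2 ≤ b) :
    (PySem.List.pyRange 0 (k : Int) 1).foldl
      (fun fl _ => (PySem.List.pyGetD fl 1 0 - PySem.List.pyGetD fl 0 0) :: fl)
      ((PySem.List.pyRange a b 1).map nf)
    = (PySem.List.pyRange (a - (k : Int)) b 1).map nf := by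
  induction k with
  | zero => simp
  | succ k ih =>
    have e1 : ((k+1 : Nat) : Int) = (k : Int) + 1 := by push_cast; ring
    rw [e1, PySem.List.pyRange_one_succ_right (by omega), List.foldl_append, ih]
    simp only [List.foldl_cons, List.foldl_nil]
    have g0 : PySem.List.pyGetD ((PySem.List.pyRange (a - (k:Int)) b 1).map nf) 0 0 = nf (a - (k:Int)) := by
      have := PySem.List.pyGetD_map_pyRange_one nf (a - (k:Int)) b 0 0 (by omega)
      simpa using this
    have g1 : PySem.List.pyGetD ((PySem.List.pyRange (a - (k:Int)) b 1).map nf) 1 0 = nf (a - (k:Int) + 1) := by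
      have := PySem.List.pyGetD_map_pyRange_one nf (a - (k:Int)) b 1 0 (by omega)
      simpa using this
    rw [g0, g1, show nf (a - (k:Int) + 1) - nf (a - (k:Int)) = nf (a - (k:Int) - 1) from
        (by rw [nf_rec_neg (a - (k:Int)) (by omega)]),
      show a - ((k:Int) + 1) = (a - (k:Int) - 1) from by ring,
      PySem.List.pyRange_one_cons (show a - (k:Int) - 1 < b from by omega),
      show a - (k:Int) - 1 + 1 = a - (k:Int) from by ring, List.map_cons]

-- B's table loop builds [fib 0, …, fib (k+1)]
lemma b_table_loop (k : Nat) :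
    (PySem.List.pyRange 0 (k : Int) 1).foldl
      (fun fl _ => fl ++ [PySem.List.pyGetD fl (-1) 0 + PySem.List.pyGetD fl (-2) 0])
      [0, 1]
    = (List.range (k + 2)).map (fun j => (Nat.fib j : Int)) := by
  induction k with
  | zero => decide
  | succ k ih =>
    have e1 : ((k+1 : Nat) : Int) = (k : Int) + 1 := by push_cast; ring
    rw [e1, PySem.List.pyRange_one_succ_right (by omega), List.foldl_append, ih]
    simp only [List.foldl_cons, List.foldl_nil]
    have hsplit : (List.range (k + 2)).map (fun j => (Nat.fib j : Int))
        = (List.range k).map (fun j => (Nat.fib j : Int)) ++ [(Nat.fib k : Int), (Nat.fib (k+1) : Int)] := by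
      rw [List.range_succ, List.range_succ, List.map_append, List.map_append]
      simp
    rw [hsplit, pyGetD_concat2_neg_two]
    rw [show ((List.range k).map (fun j => (Nat.fib j : Int)) ++ [(Nat.fib k : Int), (Nat.fib (k+1) : Int)])
        = ((List.range k).map (fun j => (Nat.fib j : Int)) ++ [(Nat.fib k : Int)]) ++ [(Nat.fib (k+1) : Int)] from by simp,
      pyGetD_concat_neg_one]
    rw [show (Nat.fib (k+1) : Int) + (Nat.fib k : Int) = (Nat.fib (k+2) : Int) from by
        rw [Nat.fib_add_two]; push_cast; ring]
    rw [List.range_succ (n := k+2), List.map_append, hsplit]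
    simp

-- ===== VERDICT (by name: the statement is the Claim_ definition above) =====
theorem negafibonacci_spec : Claim_equal_negafibonacci := by
  intro len_list _
  unfold Spec_negafibonacci
  by_cases h1 : len_list ≤ 1
  · have hm : max 1 len_list = 1 := by omega
    simp only [negafibonacci, negafibonacci_alt, hm,
      PySem.List.pyRange_one_eq_nil (show (len_list + 2) ≤ 3 from by omega),
      PySem.List.pyRange_one_eq_nil (show (len_list - 1) ≤ 0 from by omega)]
    decide
  · obtain ⟨n, hn, h2⟩ : ∃ n : Nat, len_list = (n : Int) ∧ 2 ≤ n :=
      ⟨len_list.toNat, by omega, by omega⟩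
    subst hn
    have hm : max 1 ((n : Nat) : Int) = (n : Int) := by omega
    simp only [negafibonacci, negafibonacci_alt, hm]
    rw [show (n : Int) + 2 = 3 + ((n - 1 : Nat) : Int) from by omega, a_first_loop,
        show (2 : Int) + ((n - 1 : Nat) : Int) = (n : Int) + 1 from by omega,
        show (n : Int) - 1 = ((n - 1 : Nat) : Int) from by omega,
        a_second_loop (n - 1) (-1) ((n : Int) + 1) (by omega) (by omega),
        show (-1 : Int) - ((n - 1 : Nat) : Int) = -(n : Int) from by omega,
        b_table_loop (n - 1), show n - 1 + 2 = n + 1 from by omega]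
    apply List.map_congr_left
    intro k hk
    rw [PySem.List.mem_pyRange_one] at hk
    by_cases h0 : 0 ≤ k
    · rw [nf, if_pos h0, if_pos h0,
        PySem.List.pyGetD_of_nonneg _ _ h0,
        PySem.List.getD_map_range _ _ _ _ (by omega)]
    · rw [nf, if_neg h0, if_neg h0,
        PySem.Int.mod_eq_emod_of_pos (by norm_num),
        PySem.List.pyGetD_of_nonneg _ _ (by omega : (0:Int) ≤ -k),
        PySem.List.getD_map_range _ _ _ _ (by omega)]
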